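-- pv_equiv track=rewrite | github.com/Kappa-Dev/ReGraph | regraph/category_op.py | compose_chain
-- ===== SOURCE A (Python) =====
-- def compose(d1, d2):
--     """Compose two homomorphisms given by dicts."""
--     res = dict()
--     for key, value in d1.items():
--         if value in d2.keys():
--             res[key] = d2[value]
--     return res
--
-- def compose_chain(chain):
--     """Compose a chain of homomorphisms."""
--     homomorphism = chain[0]
--     for i in range(1, len(chain)):
--         homomorphism = compose(
--             homomorphism,
--             chain[i]
--         )
--     return homomorphism
-- ===== SOURCE B (Python) =====
-- def compose_chain(chain):
--     """Compose a chain of homomorphisms by threading each key of the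
--     first map through the remaining maps in one pass."""
--     first = chain[0]
--     res = {}
--     for key, value in first.items():
--         cur = value
--         ok = True
--         for m in chain[1:]:
--             if cur in m:
--                 cur = m[cur]
--             else:
--                 ok = False
--                 break
--         if ok:
--             res[key] = cur
--     return res
-- ===== Notes on version B (the rewrite author's own statement) =====
-- stated objective: alternative
-- what changed: Instead of composing the chain pairwise (building a full intermediate composed dict for every prefix), B threads each key of the first map forward through the remaining maps individually, dropping it at the first map that misses; no intermediate dicts are built.
import Mathlib
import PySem

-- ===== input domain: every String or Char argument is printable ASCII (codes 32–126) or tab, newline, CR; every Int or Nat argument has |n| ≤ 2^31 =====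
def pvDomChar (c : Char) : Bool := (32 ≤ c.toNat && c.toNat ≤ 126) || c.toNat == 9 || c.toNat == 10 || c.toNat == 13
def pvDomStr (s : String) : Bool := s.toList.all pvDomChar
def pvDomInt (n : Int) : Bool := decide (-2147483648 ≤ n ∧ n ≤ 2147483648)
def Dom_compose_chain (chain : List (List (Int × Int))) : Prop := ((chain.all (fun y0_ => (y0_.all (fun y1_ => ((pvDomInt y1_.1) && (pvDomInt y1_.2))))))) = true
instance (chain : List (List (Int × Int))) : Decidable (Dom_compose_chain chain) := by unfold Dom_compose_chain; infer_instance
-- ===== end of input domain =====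

-- B threads each key of the first map through the rest of the chain in one pass,
-- instead of materialising an intermediate composed dict per chain element (objective: alternative).

-- ===== PORT A =====
-- compose(d1, d2): dicts are association lists; lookup is first match (PySem.Dict.mk _ |>.get?).
def composeA (d1 d2 : List (Int × Int)) : List (Int × Int) :=
  (d1.foldl (fun (res : PySem.Dict Int Int) kv =>
      match (PySem.Dict.mk d2).get? kv.2 with
      | some w => res.insert kv.1 w
      | none => res) PySem.Dict.empty).items

def compose_chain (chain : List (List (Int × Int))) : List (Int × Int) :=
  match chain with
  | [] => []   -- chain[0] raises IndexError in Python; excluded by Pre_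
  | h :: _ =>
    (PySem.List.pyRange 1 (chain.length : Int) 1).foldl
      (fun hom i => composeA hom (PySem.List.pyGetD chain i [])) h

-- ===== PORT B =====
-- thread a value through the remaining maps; none = the key is dropped (the inner break)
def threadB (v : Int) (maps : List (List (Int × Int))) : Option Int :=
  match maps with
  | [] => some v
  | m :: rest =>
    match (PySem.Dict.mk m).get? v with
    | some w => threadB w rest
    | none => none

def compose_chain_alt (chain : List (List (Int × Int))) : List (Int × Int) :=
  match chain with
  | [] => []   -- chain[0] raises IndexError in Python; excluded by Pre_
  | first :: rest =>
    (first.foldl (fun (res : PySem.Dict Int Int) kv =>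
        match threadB kv.2 rest with
        | some w => res.insert kv.1 w
        | none => res) PySem.Dict.empty).items

-- ===== PRECONDITION & SPEC =====
-- Pre_ excludes the empty chain (A raises IndexError at chain[0]) and chains whose FIRST
-- element has duplicate keys: such a list does not encode any Python dict, so A's value
-- there is an artefact of the encoding.
def Pre_compose_chain (chain : List (List (Int × Int))) : Prop :=
  chain ≠ [] ∧ ((chain.headD []).map Prod.fst).Nodup
instance (chain : List (List (Int × Int))) : Decidable (Pre_compose_chain chain) := by
  unfold Pre_compose_chain; infer_instance
def pvWitness_compose_chain : (List (List (Int × Int))) := [[(1, 2), (3, 4)], [(2, 5)]]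

def Spec_compose_chain (chain : List (List (Int × Int))) (out : List (Int × Int)) : Prop := out = compose_chain_alt chain
instance (chain : List (List (Int × Int))) (out : List (Int × Int)) : Decidable (Spec_compose_chain chain out) := by unfold Spec_compose_chain; infer_instance

-- ===== CLAIM (what is proved, stated in full; the proofs are below) =====
def Claim_equal_compose_chain : Prop := ∀ (chain : List (List (Int × Int))), Dom_compose_chain chain → Pre_compose_chain chain → Spec_compose_chain chain (compose_chain chain)

-- ===== LEMMAS AND PROOFS =====

-- A fold that inserts (kv.1, …) when g kv fires, over pairwise-fresh distinct keys, appends.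
theorem foldl_insert_filterMap (g : Int × Int → Option Int) :
    ∀ (l : List (Int × Int)) (acc : PySem.Dict Int Int),
    (acc.keys ++ l.map Prod.fst).Nodup →
    (l.foldl (fun res kv =>
        match g kv with
        | some w => res.insert kv.1 w
        | none => res) acc).items
      = acc.items ++ l.filterMap (fun kv => (g kv).map (fun w => (kv.1, w))) := by
  intro l
  induction l with
  | nil => intro acc _; simp
  | cons kv rest ih =>
    intro acc hnd
    have hnd2 := hnd
    rw [List.map_cons, List.nodup_append] at hnd2
    obtain ⟨hka, hkl, hdisj⟩ := hnd2
    have hfresh : acc.contains kv.1 = false := by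
      rw [PySem.Dict.contains_eq_decide_mem_keys]
      simp only [decide_eq_false_iff_not]
      exact fun hm => hdisj _ hm _ (by simp) rfl
    cases hg : g kv with
    | none =>
      simp only [List.foldl_cons, hg, List.filterMap_cons, Option.map_none]
      exact ih acc (by
        simp only [List.map_cons] at hnd
        exact List.Nodup.sublist (by simp) hnd)
    | some w =>
      simp only [List.foldl_cons, hg, List.filterMap_cons, Option.map_some]
      rw [ih (acc.insert kv.1 w) ?_, PySem.Dict.items_insert_of_not_contains acc w hfresh]
      · simp
      · rw [PySem.Dict.keys_insert_of_not_contains acc w hfresh]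
        rw [List.append_assoc, List.singleton_append, List.nodup_append]
        exact ⟨hka, hkl, fun x hx y hy => hdisj _ hx _ (by simpa using hy)⟩

-- the keys of the filterMap result form a sublist of the original keys
theorem keys_filterMap_sublist (g : Int × Int → Option Int) (l : List (Int × Int)) :
    ((l.filterMap (fun kv => (g kv).map (fun w => (kv.1, w)))).map Prod.fst).Sublist
      (l.map Prod.fst) := by
  induction l with
  | nil => simp
  | cons kv rest ih =>
    cases hg : g kv with
    | none =>
      simp only [List.filterMap_cons, hg, Option.map_none, List.map_cons]
      exact ih.cons _
    | some w =>
      simp only [List.filterMap_cons, hg, Option.map_some, List.map_cons]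
      exact ih.cons₂ _

-- composing with one map then threading through the rest = threading through all of them
theorem filterMap_fuse (m : List (Int × Int)) (t : List (List (Int × Int)))
    (l : List (Int × Int)) :
    ((l.filterMap (fun kv => ((PySem.Dict.mk m).get? kv.2).map (fun w => (kv.1, w)))).filterMap
        (fun kv => (threadB kv.2 t).map (fun w => (kv.1, w))))
      = l.filterMap (fun kv => (threadB kv.2 (m :: t)).map (fun w => (kv.1, w))) := by
  rw [List.filterMap_filterMap]
  apply List.filterMap_congr
  intro kv _
  cases hg : (PySem.Dict.mk m).get? kv.2 with
  | none => simp [threadB, hg]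
  | some w => cases threadB w t <;> simp [threadB, hg, Option.bind]

-- main invariant: folding composeA over t equals per-key threading through t
theorem foldl_composeA_eq (t : List (List (Int × Int))) :
    ∀ (h : List (Int × Int)), ((h.map Prod.fst).Nodup) →
    t.foldl composeA h
      = h.filterMap (fun kv => (threadB kv.2 t).map (fun w => (kv.1, w))) := by
  induction t with
  | nil =>
    intro h _
    simp only [List.foldl_nil, threadB]
    exact (List.filterMap_some (l := h)).symm
  | cons m t ih =>
    intro h hnd
    have hcomp : composeA h m
        = h.filterMap (fun kv => ((PySem.Dict.mk m).get? kv.2).map (fun w => (kv.1, w))) := by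
      unfold composeA
      rw [foldl_insert_filterMap _ h PySem.Dict.empty (by simpa using hnd)]
      rfl
    have hnd' : ((composeA h m).map Prod.fst).Nodup := by
      rw [hcomp]
      exact (keys_filterMap_sublist _ h).nodup hnd
    calc (m :: t).foldl composeA h = t.foldl composeA (composeA h m) := by simp
      _ = (composeA h m).filterMap (fun kv => (threadB kv.2 t).map (fun w => (kv.1, w))) :=
          ih _ hnd'
      _ = h.filterMap (fun kv => (threadB kv.2 (m :: t)).map (fun w => (kv.1, w))) := by
          rw [hcomp, filterMap_fuse]

-- ===== VERDICT (by name: the statement is the Claim_ definition above) =====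
theorem compose_chain_spec : Claim_equal_compose_chain := by
  intro chain _ hpre
  obtain ⟨hne, hnd⟩ := hpre
  match chain with
  | [] => exact absurd rfl hne
  | h :: t =>
    simp only [List.headD_cons] at hnd
    show compose_chain (h :: t) = compose_chain_alt (h :: t)
    simp only [compose_chain, compose_chain_alt]
    rw [PySem.List.foldl_pyRange_pyGetD' (h :: t) [] composeA h (by omega)]
    simp only [Int.toNat_one, List.drop_succ_cons, List.drop_zero]
    rw [foldl_composeA_eq t h hnd]
    rw [foldl_insert_filterMap (fun kv => threadB kv.2 t) h PySem.Dict.empty (by simpa using hnd)]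
    rfl
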